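-- pv_equiv track=rewrite | github.com/VerP404/gb_python_22_05_2023 | task_08.py | check
-- ===== SOURCE A (Python) =====
-- def check(x, y, k):
--     while x > 0:
--         a = x * y
--         x = x - 1
--         if a == k:
--             x = 0
--             return True
--     return False
-- ===== SOURCE B (Python) =====
-- def check(x, y, k):
--     if x <= 0:
--         return False
--     if y == 0:
--         return k == 0
--     q, r = divmod(k, y)
--     return r == 0 and 1 <= q <= x
-- ===== Notes on version B (the rewrite author's own statement) =====
-- stated objective: faster
-- what changed: The O(x) loop testing i*y==k for every i in [1,x] is replaced by a single closed-form divisibility check (divmod once, with y==0 handled directly).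
import Mathlib
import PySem

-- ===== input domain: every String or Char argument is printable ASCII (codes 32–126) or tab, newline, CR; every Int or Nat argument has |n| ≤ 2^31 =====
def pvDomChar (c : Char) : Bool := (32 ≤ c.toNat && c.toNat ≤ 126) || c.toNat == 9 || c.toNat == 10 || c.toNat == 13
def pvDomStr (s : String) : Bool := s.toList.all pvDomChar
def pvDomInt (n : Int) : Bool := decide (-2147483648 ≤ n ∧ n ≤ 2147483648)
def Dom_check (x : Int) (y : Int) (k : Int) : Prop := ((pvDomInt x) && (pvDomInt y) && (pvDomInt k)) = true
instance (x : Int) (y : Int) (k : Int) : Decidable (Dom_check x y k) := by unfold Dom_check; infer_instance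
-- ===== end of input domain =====

-- B replaces A's O(x) descending loop by one closed-form divisibility check (objective: faster, asymptotic).

-- ===== PORT A =====
-- while x > 0: a = x*y; x -= 1; if a == k: return True  — ported as structural recursion on the same state
def check (x : Int) (y : Int) (k : Int) : Bool :=
  if _h : x > 0 then
    if x * y == k then true else check (x - 1) y k
  else false
termination_by x.toNat
decreasing_by omega

-- ===== PORT B =====
def check_alt (x : Int) (y : Int) (k : Int) : Bool :=
  if x ≤ 0 then false
  else if y == 0 then k == 0
  else
    -- q, r = divmod(k, y)
    (PySem.Int.mod k y == 0) && (1 ≤ PySem.Int.floordiv k y && PySem.Int.floordiv k y ≤ x)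

-- ===== PRECONDITION & SPEC =====
def Spec_check (x : Int) (y : Int) (k : Int) (out : Bool) : Prop := out = check_alt x y k
instance (x : Int) (y : Int) (k : Int) (out : Bool) : Decidable (Spec_check x y k out) := by unfold Spec_check; infer_instance

-- ===== CLAIM (what is proved, stated in full; the proofs are below) =====
def Claim_equal_check : Prop := ∀ (x : Int) (y : Int) (k : Int), Dom_check x y k → Spec_check x y k (check x y k)

-- ===== LEMMAS AND PROOFS =====

-- one unfolding step of A's loop, rewritten against B's closed form
theorem check_alt_step (x y k : Int) (hx : 0 < x) :
    ((x * y == k) || check_alt (x - 1) y k) = check_alt x y k := by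
  have hx' : ¬ x ≤ 0 := by omega
  by_cases hy : y = 0
  · subst hy
    by_cases h1 : x - 1 ≤ 0
    · simp only [check_alt, if_pos h1, if_neg hx']
      by_cases hk : k = 0 <;> simp [hk] <;> omega
    · simp only [check_alt, if_neg h1, if_neg hx']
      by_cases hk : k = 0 <;> simp [hk] <;> omega
  · have hy' : ¬ ((y == 0) = true) := by simpa using hy
    have hqr := PySem.Int.floordiv_mul_add_mod k y
    set q := PySem.Int.floordiv k y with hq
    set r := PySem.Int.mod k y with hr
    simp only [check_alt, if_neg hx', if_neg hy', ← hq, ← hr]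
    by_cases hr0 : r = 0
    · have hk : q * y = k := by omega
      have hbx : (x * y == k) = (x == q) := by
        by_cases hxq : x = q
        · subst hxq; simp [hk]
        · have h1 : ¬ x * y = k := fun h => hxq (mul_right_cancel₀ hy (by rw [h, ← hk]))
          simp [h1, hxq]
      rw [hbx, hr0]
      rw [Bool.eq_iff_iff]
      split_ifs with h1 <;> simp <;> omega
    · have hrb : (r == 0) = false := by simpa using hr0
      have hdvd : ¬ y ∣ k := by rw [← PySem.Int.mod_eq_zero_iff_dvd, ← hr]; exact hr0
      have hxb : (x * y == k) = false := by
        simp only [beq_eq_false_iff_ne, ne_eq]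
        exact fun h => hdvd ⟨x, by rw [← h]; ring⟩
      rw [hrb, hxb]
      split_ifs <;> simp

theorem check_eq_aux (n : Nat) : ∀ (x y k : Int), x.toNat = n → check x y k = check_alt x y k := by
  induction n with
  | zero =>
    intro x y k hn
    have hx : ¬ x > 0 := by omega
    rw [check, dif_neg hx]
    simp [check_alt, show x ≤ 0 by omega]
  | succ m ih =>
    intro x y k hn
    have hx : 0 < x := by omega
    rw [check, dif_pos hx]
    rw [ih (x - 1) y k (by omega)]
    rw [← check_alt_step x y k hx]
    by_cases h : x * y = k <;> simp [h]

-- ===== VERDICT (by name: the statement is the Claim_ definition above) =====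
theorem check_spec : Claim_equal_check := by
  intro x y k _
  unfold Spec_check
  exact check_eq_aux x.toNat x y k rfl
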